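-- pv_equiv track=rewrite | github.com/littletone13/COLLEGEFB | backtest_fcs_day.py | _standardize_half
-- ===== SOURCE A (Python) =====
-- def _standardize_half(token: str) -> str:
--     replacements = {
--         "V2": "½",
--         "Y2": "½",
--         "y2": "½",
--         "Yz": "½",
--         "yz": "½",
--         "V": "½",
--     }
--     for src, dst in replacements.items():
--         token = token.replace(src, dst)
--     return token
-- ===== SOURCE B (Python) =====
-- def _standardize_half(token: str) -> str:
--     two = {"V2", "Y2", "y2", "Yz", "yz"}
--     out = []
--     i = 0
--     n = len(token)
--     while i < n:
--         if token[i:i + 2] in two: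
--             out.append("\u00bd")
--             i += 2
--         elif token[i] == "V":
--             out.append("\u00bd")
--             i += 1
--         else:
--             out.append(token[i])
--             i += 1
--     return "".join(out)
-- ===== Notes on version B (the rewrite author's own statement) =====
-- stated objective: alternative
-- what changed: Replaces the six sequential whole-string str.replace passes with one explicit left-to-right scan using two-character lookahead that emits the output in a single pass.
import Mathlib
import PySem

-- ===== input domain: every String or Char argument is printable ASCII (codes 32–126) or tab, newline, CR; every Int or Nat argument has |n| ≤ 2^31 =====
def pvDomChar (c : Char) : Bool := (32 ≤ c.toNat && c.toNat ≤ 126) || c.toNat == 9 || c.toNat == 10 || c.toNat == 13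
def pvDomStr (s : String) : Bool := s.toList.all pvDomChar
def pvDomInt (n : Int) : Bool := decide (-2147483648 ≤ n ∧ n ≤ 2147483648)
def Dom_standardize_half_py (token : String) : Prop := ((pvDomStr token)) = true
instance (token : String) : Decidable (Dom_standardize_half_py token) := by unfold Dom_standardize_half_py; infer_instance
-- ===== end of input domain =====

-- B replaces A's six sequential whole-string str.replace passes with a single
-- left-to-right scan with two-character lookahead (alternative decomposition, same result).

-- ===== PORT A =====
-- literal port of A: the replacements dict (as an association list, insertion order)
-- applied by the for-loop of repeated str.replace
def standardize_half_py (token : String) : String :=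
  let replacements : List (String × String) :=
    [("V2", "½"), ("Y2", "½"), ("y2", "½"), ("Yz", "½"), ("yz", "½"), ("V", "½")]
  replacements.foldl (fun t sd => PySem.Str.replace t sd.1 sd.2) token

-- ===== PORT B =====
-- the membership test 'token[i:i+2] in {"V2","Y2","y2","Yz","yz"}' on the two lookahead chars
def pvTwoChar (c d : Char) : Bool :=
  (c == 'V' && d == '2') || (c == 'Y' && d == '2') || (c == 'y' && d == '2') ||
  (c == 'Y' && d == 'z') || (c == 'y' && d == 'z')

-- B's while loop: advance by 2 on a two-char match, else by 1, appending to 'out'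
def pvScan : List Char → List Char
  | [] => []
  | [c] => if c = 'V' then ['½'] else [c]
  | c :: d :: t =>
    if pvTwoChar c d then '½' :: pvScan t
    else if c = 'V' then '½' :: pvScan (d :: t)
    else c :: pvScan (d :: t)

def standardize_half_py_alt (token : String) : String :=
  String.ofList (pvScan token.toList)

-- ===== PRECONDITION & SPEC =====
def Spec_standardize_half_py (token : String) (out : String) : Prop := out = standardize_half_py_alt token
instance (token : String) (out : String) : Decidable (Spec_standardize_half_py token out) := by unfold Spec_standardize_half_py; infer_instance

-- ===== CLAIM (what is proved, stated in full; the proofs are below) =====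
def Claim_equal_standardize_half_py : Prop := ∀ (token : String), Dom_standardize_half_py token → Spec_standardize_half_py token (standardize_half_py token)

-- ===== LEMMAS AND PROOFS =====

-- proof-side model of str.replace with a two-character pattern [a,b] → "½"
def rep2 (a b : Char) : List Char → List Char
  | [] => []
  | [c] => [c]
  | c :: d :: t => if c = a ∧ d = b then '½' :: rep2 a b t else c :: rep2 a b (d :: t)

-- proof-side model of str.replace with the one-character pattern [a] → "½"
def rep1 (a : Char) : List Char → List Char
  | [] => []
  | c :: t => if c = a then '½' :: rep1 a t else c :: rep1 a t

lemma pv_ne_and_left {p : Prop} {c a : Char} (h : c ≠ a) : ¬(c = a ∧ p) :=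
  fun hh => h hh.1

lemma rep2_ne (a b c : Char) (x : List Char) (h : ¬(c = a ∧ x.head? = some b)) :
    rep2 a b (c :: x) = c :: rep2 a b x := by
  match x with
  | [] => simp [rep2]
  | d :: t =>
    have : ¬(c = a ∧ d = b) := fun hh => h ⟨hh.1, by rw [List.head?_cons, hh.2]⟩
    simp [rep2, this]

lemma rep2_fire (a b : Char) (t : List Char) : rep2 a b (a :: b :: t) = '½' :: rep2 a b t := by
  simp [rep2]

lemma rep1_ne (a c : Char) (x : List Char) (h : c ≠ a) : rep1 a (c :: x) = c :: rep1 a x := by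
  simp [rep1, h]

lemma rep1_fire (a : Char) (x : List Char) : rep1 a (a :: x) = '½' :: rep1 a x := by
  simp [rep1]

lemma pv_ne_head {c a b d : Char} (x : List Char) (h : ¬(c = a ∧ d = b)) :
    ¬(c = a ∧ ((d :: x) : List Char).head? = some b) := by
  rintro ⟨h1, h2⟩
  simp at h2
  exact h ⟨h1, h2⟩

-- head of a replace pass over a nonempty list: the original head or '½'
lemma rep2_head_cons (a b d : Char) (x : List Char) :
    (rep2 a b (d :: x)).head? = some d ∨ (rep2 a b (d :: x)).head? = some '½' := by
  cases x with
  | nil => left; simp [rep2]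
  | cons e t =>
    by_cases h : d = a ∧ e = b
    · right; simp [rep2, h]
    · left; simp [rep2, h]

lemma rep2_head_or (a b e : Char) (x : List Char)
    (hx : x.head? = some e ∨ x.head? = some '½') :
    (rep2 a b x).head? = some e ∨ (rep2 a b x).head? = some '½' := by
  match x with
  | [] => simp at hx
  | d :: t =>
    have hd : d = e ∨ d = '½' := by
      simpa using hx
    rcases hd with h | h
    · rw [h]; exact rep2_head_cons a b e t
    · rw [h]
      rcases rep2_head_cons a b '½' t with hh | hh
      · right; exact hh
      · right; exact hh

lemma go2_eq (a b : Char) : ∀ (fuel : Nat) (l acc : List Char), l.length ≤ fuel →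
    PySem.Chars.replace.go [a, b] ['½'] fuel l acc = acc.reverse ++ rep2 a b l := by
  intro fuel
  induction fuel with
  | zero =>
    intro l acc h
    have : l = [] := List.eq_nil_of_length_eq_zero (Nat.le_zero.mp h)
    subst this
    simp [PySem.Chars.replace.go, rep2]
  | succ n ih =>
    intro l acc h
    match l with
    | [] => simp [PySem.Chars.replace.go, rep2]
    | [c] =>
      have hpre : ([a, b].isPrefixOf [c]) = false := by
        simp [List.isPrefixOf]
      simp only [PySem.Chars.replace.go, hpre, Bool.false_eq_true, if_false]
      rw [ih [] (c :: acc) (by simp)]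
      simp [rep2]
    | c :: d :: t =>
      by_cases hcd : c = a ∧ d = b
      · obtain ⟨hc, hd⟩ := hcd
        subst hc; subst hd
        have hpre : ([c, d].isPrefixOf (c :: d :: t)) = true := by
          simp [List.isPrefixOf]
        simp only [PySem.Chars.replace.go, hpre, if_true]
        show PySem.Chars.replace.go [c, d] ['½'] n t ('½' :: acc) = acc.reverse ++ rep2 c d (c :: d :: t)
        rw [ih t ('½' :: acc) (by simp at h ⊢; omega)]
        simp [rep2]
      · have hpre : ([a, b].isPrefixOf (c :: d :: t)) = false := by
          simp [List.isPrefixOf]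
          intro hc hd
          exact absurd ⟨hc.symm, hd.symm⟩ hcd
        simp only [PySem.Chars.replace.go, hpre, Bool.false_eq_true, if_false]
        rw [ih (d :: t) (c :: acc) (by simp at h ⊢; omega)]
        simp [rep2, hcd]

lemma go1_eq (a : Char) : ∀ (fuel : Nat) (l acc : List Char), l.length ≤ fuel →
    PySem.Chars.replace.go [a] ['½'] fuel l acc = acc.reverse ++ rep1 a l := by
  intro fuel
  induction fuel with
  | zero =>
    intro l acc h
    have : l = [] := List.eq_nil_of_length_eq_zero (Nat.le_zero.mp h)
    subst this
    simp [PySem.Chars.replace.go, rep1]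
  | succ n ih =>
    intro l acc h
    match l with
    | [] => simp [PySem.Chars.replace.go, rep1]
    | c :: t =>
      by_cases hc : c = a
      · subst hc
        have hpre : ([c].isPrefixOf (c :: t)) = true := by simp [List.isPrefixOf]
        simp only [PySem.Chars.replace.go, hpre, if_true]
        show PySem.Chars.replace.go [c] ['½'] n t ('½' :: acc) = acc.reverse ++ rep1 c (c :: t)
        rw [ih t ('½' :: acc) (by simp at h ⊢; omega)]
        simp [rep1]
      · have hpre : ([a].isPrefixOf (c :: t)) = false := by
          simp [List.isPrefixOf]
          exact fun h' => hc h'.symm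
        simp only [PySem.Chars.replace.go, hpre, Bool.false_eq_true, if_false]
        rw [ih t (c :: acc) (by simp at h ⊢; omega)]
        simp [rep1, hc]

lemma replace2_eq (a b : Char) (l : List Char) :
    PySem.Chars.replace l [a, b] ['½'] = rep2 a b l := by
  rw [PySem.Chars.replace]
  simp only [List.isEmpty, Bool.false_eq_true, if_false]
  rw [go2_eq a b l.length l [] (le_refl _)]
  simp

lemma replace1_eq (a : Char) (l : List Char) :
    PySem.Chars.replace l [a] ['½'] = rep1 a l := by
  rw [PySem.Chars.replace]
  simp only [List.isEmpty, Bool.false_eq_true, if_false]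
  rw [go1_eq a l.length l [] (le_refl _)]
  simp

-- A's whole pipeline on the character list
def pvPipeline (l : List Char) : List Char :=
  rep1 'V' (rep2 'y' 'z' (rep2 'Y' 'z' (rep2 'y' '2' (rep2 'Y' '2' (rep2 'V' '2' l)))))

lemma fire_V2 (t : List Char) : pvPipeline ('V' :: '2' :: t) = '½' :: pvPipeline t := by
  unfold pvPipeline
  rw [rep2_fire 'V' '2' t,
      rep2_ne 'Y' '2' '½' _ (pv_ne_and_left (by decide)),
      rep2_ne 'y' '2' '½' _ (pv_ne_and_left (by decide)),
      rep2_ne 'Y' 'z' '½' _ (pv_ne_and_left (by decide)),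
      rep2_ne 'y' 'z' '½' _ (pv_ne_and_left (by decide)),
      rep1_ne 'V' '½' _ (by decide)]

lemma fire_Y2 (t : List Char) : pvPipeline ('Y' :: '2' :: t) = '½' :: pvPipeline t := by
  unfold pvPipeline
  rw [rep2_ne 'V' '2' 'Y' _ (pv_ne_and_left (by decide)),
      rep2_ne 'V' '2' '2' _ (pv_ne_and_left (by decide)),
      rep2_fire 'Y' '2' _,
      rep2_ne 'y' '2' '½' _ (pv_ne_and_left (by decide)),
      rep2_ne 'Y' 'z' '½' _ (pv_ne_and_left (by decide)),
      rep2_ne 'y' 'z' '½' _ (pv_ne_and_left (by decide)),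
      rep1_ne 'V' '½' _ (by decide)]

lemma fire_y2 (t : List Char) : pvPipeline ('y' :: '2' :: t) = '½' :: pvPipeline t := by
  unfold pvPipeline
  rw [rep2_ne 'V' '2' 'y' _ (pv_ne_and_left (by decide)),
      rep2_ne 'V' '2' '2' _ (pv_ne_and_left (by decide)),
      rep2_ne 'Y' '2' 'y' _ (pv_ne_and_left (by decide)),
      rep2_ne 'Y' '2' '2' _ (pv_ne_and_left (by decide)),
      rep2_fire 'y' '2' _,
      rep2_ne 'Y' 'z' '½' _ (pv_ne_and_left (by decide)),
      rep2_ne 'y' 'z' '½' _ (pv_ne_and_left (by decide)),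
      rep1_ne 'V' '½' _ (by decide)]

lemma fire_Yz (t : List Char) : pvPipeline ('Y' :: 'z' :: t) = '½' :: pvPipeline t := by
  unfold pvPipeline
  rw [rep2_ne 'V' '2' 'Y' _ (pv_ne_and_left (by decide)),
      rep2_ne 'V' '2' 'z' _ (pv_ne_and_left (by decide)),
      rep2_ne 'Y' '2' 'Y' _ (pv_ne_head _ (by decide)),
      rep2_ne 'Y' '2' 'z' _ (pv_ne_and_left (by decide)),
      rep2_ne 'y' '2' 'Y' _ (pv_ne_and_left (by decide)),
      rep2_ne 'y' '2' 'z' _ (pv_ne_and_left (by decide)),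
      rep2_fire 'Y' 'z' _,
      rep2_ne 'y' 'z' '½' _ (pv_ne_and_left (by decide)),
      rep1_ne 'V' '½' _ (by decide)]

lemma fire_yz (t : List Char) : pvPipeline ('y' :: 'z' :: t) = '½' :: pvPipeline t := by
  unfold pvPipeline
  rw [rep2_ne 'V' '2' 'y' _ (pv_ne_and_left (by decide)),
      rep2_ne 'V' '2' 'z' _ (pv_ne_and_left (by decide)),
      rep2_ne 'Y' '2' 'y' _ (pv_ne_and_left (by decide)),
      rep2_ne 'Y' '2' 'z' _ (pv_ne_and_left (by decide)),
      rep2_ne 'y' '2' 'y' _ (pv_ne_head _ (by decide)),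
      rep2_ne 'y' '2' 'z' _ (pv_ne_and_left (by decide)),
      rep2_ne 'Y' 'z' 'y' _ (pv_ne_and_left (by decide)),
      rep2_ne 'Y' 'z' 'z' _ (pv_ne_and_left (by decide)),
      rep2_fire 'y' 'z' _,
      rep1_ne 'V' '½' _ (by decide)]

lemma fire_V (d : Char) (t : List Char) (hd : d ≠ '2') :
    pvPipeline ('V' :: d :: t) = '½' :: pvPipeline (d :: t) := by
  unfold pvPipeline
  rw [rep2_ne 'V' '2' 'V' _ (pv_ne_head _ (fun hh => hd hh.2)),
      rep2_ne 'Y' '2' 'V' _ (pv_ne_and_left (by decide)),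
      rep2_ne 'y' '2' 'V' _ (pv_ne_and_left (by decide)),
      rep2_ne 'Y' 'z' 'V' _ (pv_ne_and_left (by decide)),
      rep2_ne 'y' 'z' 'V' _ (pv_ne_and_left (by decide)),
      rep1_fire 'V' _]

lemma pass_other (c : Char) (x : List Char) (hV : c ≠ 'V') (hY : c ≠ 'Y') (hy : c ≠ 'y') :
    pvPipeline (c :: x) = c :: pvPipeline x := by
  unfold pvPipeline
  rw [rep2_ne 'V' '2' c _ (pv_ne_and_left hV),
      rep2_ne 'Y' '2' c _ (pv_ne_and_left hY),
      rep2_ne 'y' '2' c _ (pv_ne_and_left hy),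
      rep2_ne 'Y' 'z' c _ (pv_ne_and_left hY),
      rep2_ne 'y' 'z' c _ (pv_ne_and_left hy),
      rep1_ne 'V' c _ hV]

lemma pass_Y (d : Char) (t : List Char) (hd2 : d ≠ '2') (hdz : d ≠ 'z') :
    pvPipeline ('Y' :: d :: t) = 'Y' :: pvPipeline (d :: t) := by
  unfold pvPipeline
  have h1 := rep2_head_cons 'V' '2' d t
  have h2 := rep2_head_or 'Y' '2' d _ h1
  have h3 := rep2_head_or 'y' '2' d _ h2
  rw [rep2_ne 'V' '2' 'Y' _ (pv_ne_and_left (by decide)),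
      rep2_ne 'Y' '2' 'Y' _ (by
        rintro ⟨-, hh⟩
        rcases h1 with h | h <;> rw [h] at hh <;> simp at hh
        · exact hd2 hh),
      rep2_ne 'y' '2' 'Y' _ (pv_ne_and_left (by decide)),
      rep2_ne 'Y' 'z' 'Y' _ (by
        rintro ⟨-, hh⟩
        rcases h3 with h | h <;> rw [h] at hh <;> simp at hh
        · exact hdz hh),
      rep2_ne 'y' 'z' 'Y' _ (pv_ne_and_left (by decide)),
      rep1_ne 'V' 'Y' _ (by decide)]

lemma pass_y (d : Char) (t : List Char) (hd2 : d ≠ '2') (hdz : d ≠ 'z') :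
    pvPipeline ('y' :: d :: t) = 'y' :: pvPipeline (d :: t) := by
  unfold pvPipeline
  have h1 := rep2_head_cons 'V' '2' d t
  have h2 := rep2_head_or 'Y' '2' d _ h1
  have h3 := rep2_head_or 'y' '2' d _ h2
  have h4 := rep2_head_or 'Y' 'z' d _ h3
  rw [rep2_ne 'V' '2' 'y' _ (pv_ne_and_left (by decide)),
      rep2_ne 'Y' '2' 'y' _ (pv_ne_and_left (by decide)),
      rep2_ne 'y' '2' 'y' _ (by
        rintro ⟨-, hh⟩
        rcases h2 with h | h <;> rw [h] at hh <;> simp at hh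
        · exact hd2 hh),
      rep2_ne 'Y' 'z' 'y' _ (pv_ne_and_left (by decide)),
      rep2_ne 'y' 'z' 'y' _ (by
        rintro ⟨-, hh⟩
        rcases h4 with h | h <;> rw [h] at hh <;> simp at hh
        · exact hdz hh),
      rep1_ne 'V' 'y' _ (by decide)]

lemma pipeline_eq_scan : ∀ (n : Nat) (l : List Char), l.length ≤ n → pvPipeline l = pvScan l := by
  intro n
  induction n with
  | zero =>
    intro l h
    have : l = [] := List.eq_nil_of_length_eq_zero (Nat.le_zero.mp h)
    subst this
    simp [pvPipeline, rep1, rep2, pvScan]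
  | succ n ih =>
    intro l h
    match l with
    | [] => simp [pvPipeline, rep1, rep2, pvScan]
    | [c] =>
      by_cases hc : c = 'V'
      · subst hc; decide
      · simp [pvPipeline, rep2, rep1, pvScan, hc]
    | c :: d :: t =>
      have ht : t.length ≤ n := by simp at h; omega
      have hdt : (d :: t).length ≤ n := by simp at h ⊢; omega
      by_cases h2 : pvTwoChar c d = true
      · have hscan : pvScan (c :: d :: t) = '½' :: pvScan t := by
          simp [pvScan, h2]
        rw [hscan, ← ih t ht]
        simp only [pvTwoChar, Bool.or_eq_true, Bool.and_eq_true, beq_iff_eq] at h2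
        rcases h2 with (((⟨hc, hd⟩ | ⟨hc, hd⟩) | ⟨hc, hd⟩) | ⟨hc, hd⟩) | ⟨hc, hd⟩
        · subst hc; subst hd; exact fire_V2 t
        · subst hc; subst hd; exact fire_Y2 t
        · subst hc; subst hd; exact fire_y2 t
        · subst hc; subst hd; exact fire_Yz t
        · subst hc; subst hd; exact fire_yz t
      · have h2' : pvTwoChar c d = false := by
          cases hb : pvTwoChar c d
          · rfl
          · exact absurd hb h2
        simp only [pvTwoChar, Bool.or_eq_false_iff, Bool.and_eq_false_iff, beq_eq_false_iff_ne] at h2'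
        obtain ⟨⟨⟨⟨hV2, hY2⟩, hy2⟩, hYz⟩, hyz⟩ := h2'
        by_cases hcV : c = 'V'
        · subst hcV
          have hd2 : d ≠ '2' := hV2.resolve_left (not_not_intro rfl)
          have hscan : pvScan ('V' :: d :: t) = '½' :: pvScan (d :: t) := by
            simp [pvScan, h2]
          rw [hscan, fire_V d t hd2, ih (d :: t) hdt]
        · have hscan : pvScan (c :: d :: t) = c :: pvScan (d :: t) := by
            simp [pvScan, h2, hcV]
          rw [hscan, ← ih (d :: t) hdt]
          by_cases hcY : c = 'Y'
          · subst hcY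
            have hd2 : d ≠ '2' := hY2.resolve_left (not_not_intro rfl)
            have hdz : d ≠ 'z' := hYz.resolve_left (not_not_intro rfl)
            exact pass_Y d t hd2 hdz
          · by_cases hcy : c = 'y'
            · subst hcy
              have hd2 : d ≠ '2' := hy2.resolve_left (not_not_intro rfl)
              have hdz : d ≠ 'z' := hyz.resolve_left (not_not_intro rfl)
              exact pass_y d t hd2 hdz
            · exact pass_other c (d :: t) hcV hcY hcy

-- ===== VERDICT (by name: the statement is the Claim_ definition above) =====
theorem standardize_half_py_spec : Claim_equal_standardize_half_py := by
  intro token _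
  unfold Spec_standardize_half_py standardize_half_py standardize_half_py_alt
  simp only [List.foldl]
  simp only [PySem.Str.replace, String.toList_ofList]
  have hV2 : ("V2" : String).toList = ['V', '2'] := by decide
  have hY2 : ("Y2" : String).toList = ['Y', '2'] := by decide
  have hy2 : ("y2" : String).toList = ['y', '2'] := by decide
  have hYz : ("Yz" : String).toList = ['Y', 'z'] := by decide
  have hyz : ("yz" : String).toList = ['y', 'z'] := by decide
  have hV : ("V" : String).toList = ['V'] := by decide
  have hh : ("½" : String).toList = ['½'] := by decide
  rw [hV2, hY2, hy2, hYz, hyz, hV, hh,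
      replace2_eq, replace2_eq, replace2_eq, replace2_eq, replace2_eq, replace1_eq]
  rw [show rep1 'V' (rep2 'y' 'z' (rep2 'Y' 'z' (rep2 'y' '2' (rep2 'Y' '2'
        (rep2 'V' '2' token.toList))))) = pvPipeline token.toList from rfl]
  rw [pipeline_eq_scan token.toList.length token.toList (le_refl _)]
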